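-- pv_equiv track=rewrite | github.com/duphlot/VISTA | src/utils/agents/graph_reasoning_agent.py | _retrieve_relevant_relations
-- ===== SOURCE A (Python) =====
-- def _retrieve_relevant_relations(question: str, graph_text: str, top_k: int) -> str:
--     relations = graph_text.strip().splitlines()
--     question_tokens = set(question.lower().split())
--     scored = []
--     for rel in relations:
--         score = sum(token in rel.lower() for token in question_tokens)
--         if score > 0:
--             scored.append((score, rel))
--     scored.sort(reverse=True, key=lambda x: x[0])
--     top_relations = [rel for _, rel in scored[:top_k]]
--     if not top_relations:
--         top_relations = relations[:top_k]
--     return "\n".join(top_relations)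
-- ===== SOURCE B (Python) =====
-- def _retrieve_relevant_relations(question: str, graph_text: str, top_k: int) -> str:
--     relations = graph_text.strip().splitlines()
--     tokens = set(question.lower().split())
--     scores = [sum(t in rel.lower() for t in tokens) for rel in relations]
--     ordered = []
--     for s in range(len(tokens), 0, -1):
--         for rel, sc in zip(relations, scores):
--             if sc == s:
--                 ordered.append(rel)
--     top = ordered[:top_k]
--     if not top:
--         top = relations[:top_k]
--     return "\n".join(top)
-- ===== Notes on version B (the rewrite author's own statement) =====
-- stated objective: alternative
-- what changed: Replaces A's build-pairs-then-stable-reverse-sort-then-slice selection by a sortless sweep: scores are precomputed once, then relations are collected score-bucket by score-bucket for each possible score from len(tokens) down to 1, which reproduces the stable descending order directly.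
import Mathlib
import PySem

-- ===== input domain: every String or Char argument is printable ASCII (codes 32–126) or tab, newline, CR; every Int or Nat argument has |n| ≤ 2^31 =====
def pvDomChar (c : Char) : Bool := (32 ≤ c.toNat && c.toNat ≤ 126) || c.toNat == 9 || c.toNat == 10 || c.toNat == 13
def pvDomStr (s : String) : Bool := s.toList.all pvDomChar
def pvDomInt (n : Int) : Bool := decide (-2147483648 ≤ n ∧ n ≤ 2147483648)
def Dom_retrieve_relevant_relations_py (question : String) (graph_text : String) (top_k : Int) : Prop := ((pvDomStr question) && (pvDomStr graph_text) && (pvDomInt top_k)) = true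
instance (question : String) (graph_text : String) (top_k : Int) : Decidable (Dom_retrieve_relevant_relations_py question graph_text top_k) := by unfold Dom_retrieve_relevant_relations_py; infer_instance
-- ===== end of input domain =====

-- B replaces A's sort-and-slice by a direct highest-score-first sweep: scores are computed once, then
-- relations are collected bucket by bucket for each possible score from len(tokens) down to 1
-- (alternative decomposition of the selection step; no comparison sort).

-- ===== PORT A =====
-- score = sum(token in rel.lower() for token in question_tokens)  (a sum over a Python set: order-independent)
def pvScoreA (question_tokens : List String) (rel : String) : Int :=
  question_tokens.foldl (fun acc token => if PySem.Str.isIn token (PySem.Str.lower rel) then acc + 1 else acc) 0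

def retrieve_relevant_relations_py (question : String) (graph_text : String) (top_k : Int) : String :=
  let relations := PySem.Str.splitlines (PySem.Str.strip graph_text)
  let question_tokens : PySem.Set String := PySem.Set.ofList (PySem.Str.split₀ (PySem.Str.lower question))
  let scored := relations.foldl (fun acc rel =>
      if 0 < pvScoreA question_tokens rel then acc ++ [(pvScoreA question_tokens rel, rel)] else acc) []
  let scoredSorted := PySem.List.sorted scored (fun x => x.1) true
  let top_relations := (PySem.List.slice scoredSorted none (some top_k)).map (fun x => x.2)
  let top_relations := if top_relations = [] then PySem.List.slice relations none (some top_k) else top_relations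
  PySem.Str.join "\n" top_relations

-- ===== PORT B =====
def pvScoreB (tokens : List String) (rel : String) : Int :=
  tokens.foldl (fun acc t => if PySem.Str.isIn t (PySem.Str.lower rel) then acc + 1 else acc) 0

def retrieve_relevant_relations_py_alt (question : String) (graph_text : String) (top_k : Int) : String :=
  let relations := PySem.Str.splitlines (PySem.Str.strip graph_text)
  let tokens : PySem.Set String := PySem.Set.ofList (PySem.Str.split₀ (PySem.Str.lower question))
  let scores := relations.map (fun rel => pvScoreB tokens rel)
  let ordered := (PySem.List.pyRange (tokens.length : Int) 0 (-1)).foldl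
      (fun acc s => (relations.zip scores).foldl
        (fun acc2 p => if p.2 == s then acc2 ++ [p.1] else acc2) acc) []
  let top := PySem.List.slice ordered none (some top_k)
  let top := if top = [] then PySem.List.slice relations none (some top_k) else top
  PySem.Str.join "\n" top

-- ===== PRECONDITION & SPEC =====
def Spec_retrieve_relevant_relations_py (question : String) (graph_text : String) (top_k : Int) (out : String) : Prop := out = retrieve_relevant_relations_py_alt question graph_text top_k
instance (question : String) (graph_text : String) (top_k : Int) (out : String) : Decidable (Spec_retrieve_relevant_relations_py question graph_text top_k out) := by unfold Spec_retrieve_relevant_relations_py; infer_instance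

-- ===== CLAIM (what is proved, stated in full; the proofs are below) =====
def Claim_equal_retrieve_relevant_relations_py : Prop := ∀ (question : String) (graph_text : String) (top_k : Int), Dom_retrieve_relevant_relations_py question graph_text top_k → Spec_retrieve_relevant_relations_py question graph_text top_k (retrieve_relevant_relations_py question graph_text top_k)

-- ===== LEMMAS AND PROOFS =====

theorem pvScoreB_eq_pvScoreA : pvScoreB = pvScoreA := rfl

theorem pv_score_le (tokens : List String) (rel : String) :
    pvScoreA tokens rel ≤ (tokens.length : Int) := by
  unfold pvScoreA
  rw [PySem.List.foldl_if_add_one (p := fun t => PySem.Str.isIn t (PySem.Str.lower rel))]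
  have := List.countP_le_length (l := tokens) (p := fun t => PySem.Str.isIn t (PySem.Str.lower rel))
  omega

-- slicing to a stop bound commutes with map
theorem pv_slice_map {α β : Type} (g : α → β) (xs : List α) (k : Int) :
    PySem.List.slice (xs.map g) none (some k) = (PySem.List.slice xs none (some k)).map g := by
  simp [PySem.List.slice, PySem.List.clampIdx, List.map_take]

theorem pv_zip_map_self {α β : Type} (g : α → β) (l : List α) :
    l.zip (l.map g) = l.map (fun a => (a, g a)) := by
  induction l with
  | nil => rfl
  | cons a t ih => simp [ih]

-- range(n, 0, -1) is strictly decreasing and enumerates 1..n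
theorem pv_pyRange_desc (n : Int) :
    (PySem.List.pyRange n 0 (-1)).Pairwise (fun a b => b < a) := by
  rw [PySem.List.pyRange_neg_one]
  exact List.Pairwise.map _ (fun {i j} (h : i < j) => by omega) List.pairwise_lt_range

theorem pv_mem_pyRange_desc (n x : Int) :
    x ∈ PySem.List.pyRange n 0 (-1) ↔ 0 < x ∧ x ≤ n := by
  rw [PySem.List.mem_pyRange_iff_of_neg (by omega)]
  constructor
  · rintro ⟨h1, h2, _⟩; exact ⟨h1, h2⟩
  · rintro ⟨h1, h2⟩; exact ⟨h1, h2, ⟨-(x - n), by ring⟩⟩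

theorem pv_insertBy_cons {α : Type} (before : α → α → Bool) (x y : α) (l : List α) :
    PySem.List.insertBy before x (y :: l)
      = if before x y then x :: y :: l else y :: PySem.List.insertBy before x l := rfl

theorem pv_insertBy_append {α : Type} (before : α → α → Bool) (x : α) (l1 l2 : List α)
    (h : ∀ y ∈ l1, before x y = false) :
    PySem.List.insertBy before x (l1 ++ l2) = l1 ++ PySem.List.insertBy before x l2 := by
  induction l1 with
  | nil => rfl
  | cons y ys ih =>
    rw [List.cons_append, pv_insertBy_cons, h y (by simp), List.cons_append]
    simp only [Bool.false_eq_true, if_false, List.cons.injEq, true_and]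
    exact ih (fun z hz => h z (by simp [hz]))

-- inserting x into a concatenation of buckets with strictly decreasing keys appends x at the end of
-- its own bucket (this is exactly the stability of Python's reverse sort)
theorem pv_insertBy_flatMap (vals : List Int) (F : Int → List (Int × String)) (x : Int × String)
    (hv : vals.Pairwise (fun a b => b < a)) (hx : x.1 ∈ vals)
    (hF : ∀ v ∈ vals, ∀ p ∈ F v, p.1 = v) :
    PySem.List.insertBy (fun a b => decide (b.1 < a.1)) x (vals.flatMap F)
      = vals.flatMap (fun v => F v ++ if x.1 = v then [x] else []) := by
  induction vals with
  | nil => simp at hx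
  | cons v rest ih =>
    simp only [List.flatMap_cons]
    rcases List.mem_cons.1 hx with hxv | hxr
    · have hb : ∀ y ∈ F v, (fun a b => decide (b.1 < a.1)) x y = false := by
        intro y hy
        have := hF v (by simp) y hy
        simp [this, hxv]
      rw [pv_insertBy_append _ _ _ _ hb]
      have hrest : rest.flatMap (fun w => F w ++ if x.1 = w then [x] else []) = rest.flatMap F := by
        apply List.flatMap_congr
        intro w hw
        have hlt : w < v := (List.pairwise_cons.1 hv).1 w hw
        have : ¬ (x.1 = w) := by omega
        simp [this]
      rw [hrest]
      have hins : PySem.List.insertBy (fun a b => decide (b.1 < a.1)) x (rest.flatMap F)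
          = x :: rest.flatMap F := by
        cases hfl : rest.flatMap F with
        | nil => rfl
        | cons z zs =>
          have hz : z ∈ rest.flatMap F := by rw [hfl]; simp
          obtain ⟨w, hw, hzw⟩ := List.mem_flatMap.1 hz
          have hzv : z.1 = w := hF w (by simp [hw]) z hzw
          have hlt : w < v := (List.pairwise_cons.1 hv).1 w hw
          rw [pv_insertBy_cons]
          have : decide (z.1 < x.1) = true := by simp [hzv, hxv]; omega
          simp only [this, if_true]
      rw [hins]
      simp [hxv]
    · have hlt : x.1 < v := (List.pairwise_cons.1 hv).1 x.1 hxr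
      have hb : ∀ y ∈ F v, (fun a b => decide (b.1 < a.1)) x y = false := by
        intro y hy
        have := hF v (by simp) y hy
        simp [this]; omega
      rw [pv_insertBy_append _ _ _ _ hb]
      rw [ih (List.pairwise_cons.1 hv).2 hxr (fun w hw => hF w (by simp [hw]))]
      have : ¬ (x.1 = v) := by omega
      simp [this]

-- Python's stable reverse sort by key = concatenation of key buckets, highest key first
theorem pv_sorted_rev_eq_flatMap_filter (xs : List (Int × String)) (vals : List Int)
    (hv : vals.Pairwise (fun a b => b < a)) (hx : ∀ p ∈ xs, p.1 ∈ vals) :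
    PySem.List.sorted xs (fun p => p.1) true
      = vals.flatMap (fun v => xs.filter (fun p => p.1 == v)) := by
  rw [PySem.List.sorted_rev_eq_foldl_insertBy]
  induction xs using List.reverseRecOn with
  | nil => simp
  | append_singleton ys x ih =>
    rw [List.foldl_append, List.foldl_cons, List.foldl_nil]
    rw [ih (fun p hp => hx p (by simp [hp]))]
    rw [pv_insertBy_flatMap vals _ x hv (hx x (by simp))
      (fun v hv' p hp => beq_iff_eq.1 (List.mem_filter.1 hp).2)]
    apply List.flatMap_congr
    intro v hv'
    rw [List.filter_append]
    simp only [List.filter_cons, List.filter_nil]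
    by_cases hxe : x.1 = v
    · simp [hxe]
    · have : (x.1 == v) = false := by simp [hxe]
      simp [this, hxe]

-- the central fact: A's sorted-and-projected list equals B's descending score sweep
theorem pv_lists_eq (relations : List String) (toks : List String) :
    ((PySem.List.sorted
        (relations.foldl (fun acc rel =>
          if 0 < pvScoreA toks rel then acc ++ [(pvScoreA toks rel, rel)] else acc) [])
        (fun x => x.1) true).map (fun x => x.2))
      = (PySem.List.pyRange (toks.length : Int) 0 (-1)).foldl
          (fun acc s => (relations.zip (relations.map (fun rel => pvScoreA toks rel))).foldl
            (fun acc2 p => if p.2 == s then acc2 ++ [p.1] else acc2) acc) [] := by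
  rw [PySem.List.foldl_append_ite (p := fun rel => 0 < pvScoreA toks rel)
      (f := fun rel => (pvScoreA toks rel, rel))]
  rw [List.nil_append]
  rw [pv_sorted_rev_eq_flatMap_filter _ (PySem.List.pyRange (toks.length : Int) 0 (-1))
      (pv_pyRange_desc _) ?hx]
  case hx =>
    intro p hp
    obtain ⟨r, hr, rfl⟩ := List.mem_map.1 hp
    have := (List.mem_filter.1 hr).2
    rw [pv_mem_pyRange_desc]
    exact ⟨of_decide_eq_true this, pv_score_le toks r⟩
  rw [pv_zip_map_self]
  have hinner : ∀ (acc : List String) (s : Int), s ∈ PySem.List.pyRange (toks.length : Int) 0 (-1) →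
      (relations.map (fun a => (a, pvScoreA toks a))).foldl
        (fun acc2 p => if p.2 == s then acc2 ++ [p.1] else acc2) acc
      = acc ++ relations.filter (fun r => pvScoreA toks r == s) := by
    intro acc s _
    rw [PySem.List.foldl_append_if (fun (q : String × Int) => q.2 == s) (fun q => q.1)]
    rw [List.filter_map, List.map_map]
    simp [Function.comp_def]
  have houter : List.foldl
      (fun acc s =>
        List.foldl (fun acc2 p => if (p.2 == s) = true then acc2 ++ [p.1] else acc2) acc
          (List.map (fun a => (a, pvScoreA toks a)) relations))
      [] (PySem.List.pyRange ((toks.length : Int)) 0 (-1))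
      = List.foldl (fun acc s => acc ++ relations.filter (fun r => pvScoreA toks r == s))
          [] (PySem.List.pyRange ((toks.length : Int)) 0 (-1)) :=
    PySem.List.foldl_congr_mem _ _ _ _ hinner
  rw [houter]
  rw [PySem.List.foldl_append_eq_flatMap, List.nil_append]
  rw [List.map_flatMap]
  apply List.flatMap_congr
  intro v hv
  have hvpos : 0 < v := ((pv_mem_pyRange_desc _ _).1 hv).1
  rw [List.filter_map, List.map_map]
  have : ((fun p => p.2) ∘ fun rel => (pvScoreA toks rel, rel)) = (fun rel : String => rel) := rfl
  rw [this, List.map_id']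
  rw [List.filter_filter]
  apply List.filter_congr
  intro r _
  by_cases h : pvScoreA toks r = v
  · simp [h]; omega
  · simp [h]

-- ===== VERDICT (by name: the statement is the Claim_ definition above) =====
theorem retrieve_relevant_relations_py_spec : Claim_equal_retrieve_relevant_relations_py := by
  intro question graph_text top_k _
  unfold Spec_retrieve_relevant_relations_py
  simp only [retrieve_relevant_relations_py, retrieve_relevant_relations_py_alt,
    pvScoreB_eq_pvScoreA]
  rw [← pv_slice_map, pv_lists_eq]
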